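-- pv_equiv track=rewrite | github.com/tanishra/cdss | app/services/drug_interaction_service.py | _same_drug_class
-- ===== SOURCE A (Python) =====
-- def _same_drug_class(med1: str, med2: str) -> bool:
--     """Check if medications are in the same class."""
--     drug_classes = {
--         "penicillin": ["amoxicillin", "ampicillin", "penicillin"],
--         "cephalosporin": ["cephalexin", "ceftriaxone"],
--         "nsaid": ["ibuprofen", "naproxen", "aspirin"],
--         "statin": ["atorvastatin", "simvastatin", "rosuvastatin"],
--     }
--
--     for drug_class, members in drug_classes.items():
--         if med1 in members and med2 in members:
--             return True
--
--     return False
-- ===== SOURCE B (Python) =====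
-- _DRUG_CLASSES = {
--     "penicillin": ["amoxicillin", "ampicillin", "penicillin"],
--     "cephalosporin": ["cephalexin", "ceftriaxone"],
--     "nsaid": ["ibuprofen", "naproxen", "aspirin"],
--     "statin": ["atorvastatin", "simvastatin", "rosuvastatin"],
-- }
--
-- # Inverted index built once: drug -> its class name.
-- _DRUG_TO_CLASS = {m: c for c, ms in _DRUG_CLASSES.items() for m in ms}
--
--
-- def _same_drug_class(med1: str, med2: str) -> bool:
--     """Check if medications are in the same class."""
--     cls1 = _DRUG_TO_CLASS.get(med1)
--     return cls1 is not None and cls1 == _DRUG_TO_CLASS.get(med2)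
-- ===== Notes on version B (the rewrite author's own statement) =====
-- stated objective: simpler
-- what changed: Replaces the per-call scan over all classes (with two list-membership tests each) by an inverted drug->class index built once at module load; the call is two dict lookups and one equality.
import Mathlib
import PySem

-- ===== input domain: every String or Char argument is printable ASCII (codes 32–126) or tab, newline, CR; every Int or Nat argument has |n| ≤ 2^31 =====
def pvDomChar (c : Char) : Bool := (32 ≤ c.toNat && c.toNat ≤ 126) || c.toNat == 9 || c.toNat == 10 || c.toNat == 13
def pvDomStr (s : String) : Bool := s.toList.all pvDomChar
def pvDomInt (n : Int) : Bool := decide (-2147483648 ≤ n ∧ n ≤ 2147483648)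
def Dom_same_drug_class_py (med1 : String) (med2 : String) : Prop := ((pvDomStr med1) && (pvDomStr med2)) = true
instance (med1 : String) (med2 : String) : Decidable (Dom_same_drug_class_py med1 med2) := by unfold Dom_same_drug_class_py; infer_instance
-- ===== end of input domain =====

-- B replaces A's per-call scan over all classes by an inverted drug->class index built once; simpler call path.

-- ===== PORT A =====
def pyA_drug_classes : PySem.Dict String (List String) :=
  ⟨[("penicillin", ["amoxicillin", "ampicillin", "penicillin"]),
     ("cephalosporin", ["cephalexin", "ceftriaxone"]),
     ("nsaid", ["ibuprofen", "naproxen", "aspirin"]),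
     ("statin", ["atorvastatin", "simvastatin", "rosuvastatin"])]⟩

-- the for-loop with early return over drug_classes.items()
def pyA_loop (med1 : String) (med2 : String) : List (String × List String) → Bool
  | [] => false
  | (_, members) :: rest =>
      if members.contains med1 && members.contains med2 then true
      else pyA_loop med1 med2 rest

def same_drug_class_py (med1 : String) (med2 : String) : Bool :=
  pyA_loop med1 med2 (PySem.Dict.items pyA_drug_classes)

-- ===== PORT B =====
-- the dict comprehension {m: c for c, ms in _DRUG_CLASSES.items() for m in ms}
def pyB_drug_to_class : PySem.Dict String String :=
  (PySem.Dict.items pyA_drug_classes).foldl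
    (fun d cm => cm.2.foldl (fun d m => PySem.Dict.insert d m cm.1) d)
    PySem.Dict.empty

def same_drug_class_py_alt (med1 : String) (med2 : String) : Bool :=
  match PySem.Dict.get? pyB_drug_to_class med1 with
  | none => false
  | some cls1 => PySem.Dict.get? pyB_drug_to_class med2 == some cls1

-- ===== PRECONDITION & SPEC =====
def Spec_same_drug_class_py (med1 : String) (med2 : String) (out : Bool) : Prop := out = same_drug_class_py_alt med1 med2
instance (med1 : String) (med2 : String) (out : Bool) : Decidable (Spec_same_drug_class_py med1 med2 out) := by unfold Spec_same_drug_class_py; infer_instance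

-- ===== CLAIM (what is proved, stated in full; the proofs are below) =====
def Claim_equal_same_drug_class_py : Prop := ∀ (med1 : String) (med2 : String), Dom_same_drug_class_py med1 med2 → Spec_same_drug_class_py med1 med2 (same_drug_class_py med1 med2)

-- ===== LEMMAS AND PROOFS =====

-- all drug names occurring in the table
def pvAllDrugs : List String :=
  ["amoxicillin", "ampicillin", "penicillin", "cephalexin", "ceftriaxone",
   "ibuprofen", "naproxen", "aspirin", "atorvastatin", "simvastatin", "rosuvastatin"]

-- the inverted index B builds, evaluated to its literal value
theorem pvB_index_eval :
    pyB_drug_to_class =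
      ⟨[("amoxicillin", "penicillin"), ("ampicillin", "penicillin"), ("penicillin", "penicillin"),
        ("cephalexin", "cephalosporin"), ("ceftriaxone", "cephalosporin"),
        ("ibuprofen", "nsaid"), ("naproxen", "nsaid"), ("aspirin", "nsaid"),
        ("atorvastatin", "statin"), ("simvastatin", "statin"), ("rosuvastatin", "statin")]⟩ := by
  decide

-- for a med not in the table, A's loop returns false
theorem pvA_unknown (med1 med2 : String) (h : med1 ∉ pvAllDrugs) :
    same_drug_class_py med1 med2 = false := by
  simp only [pvAllDrugs, List.mem_cons, List.not_mem_nil, or_false, not_or] at h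
  obtain ⟨h1, h2, h3, h4, h5, h6, h7, h8, h9, h10, h11⟩ := h
  simp [same_drug_class_py, pyA_drug_classes, PySem.Dict.items, pyA_loop,
        h1, h2, h3, h4, h5, h6, h7, h8, h9, h10, h11]

-- for a med not in the table, B's lookup returns none
theorem pvB_unknown (med : String) (h : med ∉ pvAllDrugs) :
    PySem.Dict.get? pyB_drug_to_class med = none := by
  simp only [pvAllDrugs, List.mem_cons, List.not_mem_nil, or_false, not_or] at h
  obtain ⟨h1, h2, h3, h4, h5, h6, h7, h8, h9, h10, h11⟩ := h
  rw [pvB_index_eval]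
  have e1 : ("amoxicillin" == med) = false := beq_eq_false_iff_ne.mpr (Ne.symm h1)
  have e2 : ("ampicillin" == med) = false := beq_eq_false_iff_ne.mpr (Ne.symm h2)
  have e3 : ("penicillin" == med) = false := beq_eq_false_iff_ne.mpr (Ne.symm h3)
  have e4 : ("cephalexin" == med) = false := beq_eq_false_iff_ne.mpr (Ne.symm h4)
  have e5 : ("ceftriaxone" == med) = false := beq_eq_false_iff_ne.mpr (Ne.symm h5)
  have e6 : ("ibuprofen" == med) = false := beq_eq_false_iff_ne.mpr (Ne.symm h6)
  have e7 : ("naproxen" == med) = false := beq_eq_false_iff_ne.mpr (Ne.symm h7)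
  have e8 : ("aspirin" == med) = false := beq_eq_false_iff_ne.mpr (Ne.symm h8)
  have e9 : ("atorvastatin" == med) = false := beq_eq_false_iff_ne.mpr (Ne.symm h9)
  have e10 : ("simvastatin" == med) = false := beq_eq_false_iff_ne.mpr (Ne.symm h10)
  have e11 : ("rosuvastatin" == med) = false := beq_eq_false_iff_ne.mpr (Ne.symm h11)
  simp [PySem.Dict.get?, List.find?, e1, e2, e3, e4, e5, e6, e7, e8, e9, e10, e11]

-- A agrees with B whenever med1 is a known drug
theorem pvAB_known (med1 : String) (h : med1 ∈ pvAllDrugs) (med2 : String) :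
    same_drug_class_py med1 med2 = same_drug_class_py_alt med1 med2 := by
  by_cases h2 : med2 ∈ pvAllDrugs
  · fin_cases h <;> fin_cases h2 <;> decide
  · have hb2 : PySem.Dict.get? pyB_drug_to_class med2 = none := pvB_unknown med2 h2
    simp only [pvAllDrugs, List.mem_cons, List.not_mem_nil, or_false, not_or] at h2
    obtain ⟨g1, g2, g3, g4, g5, g6, g7, g8, g9, g10, g11⟩ := h2
    fin_cases h <;>
      simp [same_drug_class_py, same_drug_class_py_alt, pyA_drug_classes,
            PySem.Dict.items, pyA_loop, hb2,
            g1, g2, g3, g4, g5, g6, g7, g8, g9, g10, g11] <;>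
      decide

-- ===== VERDICT (by name: the statement is the Claim_ definition above) =====
theorem same_drug_class_py_spec : Claim_equal_same_drug_class_py := by
  intro med1 med2 _
  unfold Spec_same_drug_class_py
  by_cases h : med1 ∈ pvAllDrugs
  · exact pvAB_known med1 h med2
  · rw [pvA_unknown med1 med2 h]
    simp [same_drug_class_py_alt, pvB_unknown med1 h]
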